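-- pv_equiv track=rewrite | github.com/eerimoq/asn1tools | asn1tools/c_source/utils.py | indent_lines
-- ===== SOURCE A (Python) =====
-- def strip_blank_lines(lines):
--     try:
--         while lines[0] == '':
--             del lines[0]
--
--         while lines[-1] == '':
--             del lines[-1]
--     except IndexError:
--         pass
--
--     stripped = []
--
--     for line in lines:
--         if line == '' and stripped[-1] == '':
--             continue
--
--         stripped.append(line)
--
--     return stripped
--
-- def indent_lines(lines):
--     indented_lines = []
--
--     for line in lines:
--         if line:
--             indented_line = 4 * ' ' + line
--         else:
--             indented_line = line
--
--         indented_lines.append(indented_line)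
--
--     return strip_blank_lines(indented_lines)
-- ===== SOURCE B (Python) =====
-- def indent_lines(lines):
--     ind = ['    ' + line if line else line for line in lines]
--     out = []
--     i = 0
--     n = len(ind)
--     while i < n:
--         if ind[i]:
--             out.append(ind[i])
--             i += 1
--         else:
--             out.append('')
--             while i < n and not ind[i]:
--                 i += 1
--     if out and out[0] == '':
--         del out[0]
--     if out and out[-1] == '':
--         del out[-1]
--     return out
-- ===== Notes on version B (the rewrite author's own statement) =====
-- stated objective: alternative
-- what changed: Single forward pass that emits each run of blank lines as one '' while copying nonblank lines (index skipping the whole run), followed by a constant-time trim of at most one leading and one trailing blank, instead of A's append loop plus destructive del-while trimming plus a second dedup pass reading the accumulator's last element.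
import Mathlib
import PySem

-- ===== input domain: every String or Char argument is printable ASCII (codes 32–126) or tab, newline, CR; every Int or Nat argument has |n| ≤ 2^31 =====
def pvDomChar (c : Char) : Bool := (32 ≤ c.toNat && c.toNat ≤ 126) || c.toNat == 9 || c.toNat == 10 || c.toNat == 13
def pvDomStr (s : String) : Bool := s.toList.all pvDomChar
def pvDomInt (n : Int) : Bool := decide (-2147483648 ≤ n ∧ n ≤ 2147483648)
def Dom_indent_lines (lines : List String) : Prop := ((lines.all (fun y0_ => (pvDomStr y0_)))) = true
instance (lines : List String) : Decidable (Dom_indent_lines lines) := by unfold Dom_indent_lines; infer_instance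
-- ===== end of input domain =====

-- B replaces A's append loop + destructive del-while trims + second dedup pass by one
-- forward pass that copies nonblank lines and emits each blank run as a single '',
-- followed by a constant-time trim of at most one leading and one trailing blank ('alternative').

-- ===== PORT A =====

-- A's second while loop `while lines[-1] == '': del lines[-1]` = drop the trailing blank run.
def dropTrailBlanks (l : List String) : List String :=
  (l.reverse.dropWhile (fun s => s == "")).reverse

-- A's `for line in lines: …` loop of strip_blank_lines, with its accumulator `stripped`.
-- Python's `stripped[-1]` is `PySem.List.pyGet? stripped (-1)` (in range wherever this loop
-- is reached from indent_lines, since the leading blank run was already removed).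
def stripGo (stripped : List String) : List String → List String
  | [] => stripped
  | line :: rest =>
    if line = "" ∧ PySem.List.pyGet? stripped (-1) = some "" then stripGo stripped rest
    else stripGo (stripped ++ [line]) rest

def strip_blank_lines (lines : List String) : List String :=
  let l1 := lines.dropWhile (fun s => s == "")   -- while lines[0] == '': del lines[0]
  let l2 := dropTrailBlanks l1                   -- while lines[-1] == '': del lines[-1]
  stripGo [] l2

def indent_lines (lines : List String) : List String :=
  strip_blank_lines
    (lines.foldl (fun acc line => acc ++ [if line ≠ "" then "    " ++ line else line]) [])

-- ===== PORT B =====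

-- B's index loop: copy a nonblank line; on a blank line emit one '' and skip the whole run.
def collapseRuns : List String → List String
  | [] => []
  | x :: rest =>
    if x = "" then "" :: collapseRuns (rest.dropWhile (fun s => s == ""))
    else x :: collapseRuns rest
termination_by l => l.length
decreasing_by
  · have := List.length_dropWhile_le (fun s : String => s == "") rest
    simp; omega
  · simp

def indent_lines_alt (lines : List String) : List String :=
  let ind := lines.map (fun line => if line ≠ "" then "    " ++ line else line)
  let c := collapseRuns ind
  let c1 := if c.head? = some "" then c.tail else c        -- if out and out[0] == '': del out[0]
  if c1.getLast? = some "" then c1.dropLast else c1        -- if out and out[-1] == '': del out[-1]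

-- ===== PRECONDITION & SPEC =====
def Spec_indent_lines (lines : List String) (out : List String) : Prop := out = indent_lines_alt lines
instance (lines : List String) (out : List String) : Decidable (Spec_indent_lines lines out) := by unfold Spec_indent_lines; infer_instance

-- ===== CLAIM (what is proved, stated in full; the proofs are below) =====
def Claim_equal_indent_lines : Prop := ∀ (lines : List String), Dom_indent_lines lines → Spec_indent_lines lines (indent_lines lines)

-- ===== LEMMAS AND PROOFS =====

theorem pyGet_neg_one (acc : List String) : PySem.List.pyGet? acc (-1) = acc.getLast? := by
  induction acc using List.reverseRecOn with
  | nil => rfl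
  | append_singleton ys y ih => simp [PySem.List.pyGet?, PySem.List.pyIdx?]

theorem dropTrail_cons (x : String) (xs : List String) :
    dropTrailBlanks (x :: xs) =
      if x = "" ∧ dropTrailBlanks xs = [] then [] else x :: dropTrailBlanks xs := by
  unfold dropTrailBlanks
  rw [List.reverse_cons, List.dropWhile_append]
  by_cases h : (xs.reverse.dropWhile (fun s => s == "")) = []
  · simp [h]
    by_cases hx : x = "" <;> simp [hx]
  · simp [h, List.isEmpty_iff]

theorem dropTrail_eq_nil (xs : List String) :
    dropTrailBlanks xs = [] ↔ ∀ s ∈ xs, s = "" := by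
  unfold dropTrailBlanks
  simp [List.dropWhile_eq_nil_iff]

-- trimming the leading blank run and trimming the trailing blank run commute
theorem dropLead_dropTrail (s : List String) :
    (dropTrailBlanks s).dropWhile (fun t => t == "") =
      dropTrailBlanks (s.dropWhile (fun t => t == "")) := by
  induction s with
  | nil => rfl
  | cons x xs ih =>
    by_cases hx : x = ""
    · subst hx
      rw [dropTrail_cons]
      by_cases h : dropTrailBlanks xs = []
      · have hall : ∀ t ∈ xs, t = "" := (dropTrail_eq_nil xs).1 h
        have h2 : xs.dropWhile (fun t => t == "") = [] :=
          List.dropWhile_eq_nil_iff.2 (by intro t ht; simp [hall t ht])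
        simp [h, h2]
        rfl
      · simp [h]
        exact ih
    · have hR : (x :: xs).dropWhile (fun t => t == "") = x :: xs := by
        simp [hx]
      rw [hR, dropTrail_cons]
      by_cases h : dropTrailBlanks xs = [] <;>
        simp [h, hx]

theorem collapseRuns_append_nonblank (s : List String) (x : String) (hx : x ≠ "") :
    collapseRuns (s ++ [x]) = collapseRuns s ++ [x] := by
  induction s using collapseRuns.induct with
  | case1 => simp [collapseRuns, hx]
  | case2 rest ih =>
    have hd : (rest ++ [x]).dropWhile (fun s => s == "") =
        rest.dropWhile (fun s => s == "") ++ [x] := by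
      rw [List.dropWhile_append]
      by_cases he : rest.dropWhile (fun s => s == "") = [] <;>
        simp [he, hx]
    rw [List.cons_append]
    simp [collapseRuns, hd, ih]
  | case3 y rest hy ih =>
    simp only [List.cons_append, collapseRuns, if_neg hy, ih]

theorem collapseRuns_append_blank (s : List String) :
    collapseRuns (s ++ [""]) = collapseRuns (dropTrailBlanks s) ++ [""] := by
  induction s using collapseRuns.induct with
  | case1 => simp [collapseRuns, dropTrailBlanks]
  | case2 rest ih =>
    by_cases hall : ∀ t ∈ rest, t = ""
    · have h1 : dropTrailBlanks ("" :: rest) = [] :=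
        (dropTrail_eq_nil _).2 (by
          intro t ht
          rcases List.mem_cons.1 ht with h | h
          · exact h
          · exact hall t h)
      have h2 : (rest ++ [""]).dropWhile (fun s => s == "") = [] := by
        rw [List.dropWhile_append]
        have h3 : rest.dropWhile (fun s => s == "") = [] :=
          List.dropWhile_eq_nil_iff.2 (by intro t ht; simp [hall t ht])
        simp [h3]
      simp [collapseRuns, h1, h2]
    · have hne : dropTrailBlanks rest ≠ [] := by
        intro hc; exact hall ((dropTrail_eq_nil rest).1 hc)
      have he : rest.dropWhile (fun s => s == "") ≠ [] := by
        intro hc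
        exact hall (by intro t ht; simpa using List.dropWhile_eq_nil_iff.1 hc t ht)
      have hd : (rest ++ [""]).dropWhile (fun s => s == "") =
          rest.dropWhile (fun s => s == "") ++ [""] := by
        rw [List.dropWhile_append]
        simp [he]
      have htr : dropTrailBlanks ("" :: rest) = "" :: dropTrailBlanks rest := by
        rw [dropTrail_cons]; simp [hne]
      rw [List.cons_append]
      simp [collapseRuns, hd, ih, htr, dropLead_dropTrail]
  | case3 y rest hy ih =>
    have htr : dropTrailBlanks (y :: rest) = y :: dropTrailBlanks rest := by
      rw [dropTrail_cons]; simp [hy]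
    simp only [List.cons_append, collapseRuns, if_neg hy, ih, htr]

theorem collapseRuns_reverse (l : List String) :
    collapseRuns l.reverse = (collapseRuns l).reverse := by
  induction l using collapseRuns.induct with
  | case1 => simp [collapseRuns]
  | case2 rest ih =>
    have h : dropTrailBlanks rest.reverse = (rest.dropWhile (fun s => s == "")).reverse := by
      unfold dropTrailBlanks; rw [List.reverse_reverse]
    rw [List.reverse_cons, collapseRuns_append_blank, h, ih]
    simp [collapseRuns]
  | case3 y rest hy ih =>
    rw [List.reverse_cons, collapseRuns_append_nonblank _ _ hy, ih]
    simp [collapseRuns, hy]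

theorem collapseRuns_dropLead (l : List String) :
    collapseRuns (l.dropWhile (fun t => t == "")) =
      if (collapseRuns l).head? = some "" then (collapseRuns l).tail else collapseRuns l := by
  match l with
  | [] => simp [collapseRuns]
  | y :: rest =>
    by_cases hy : y = ""
    · subst hy; simp [collapseRuns]
    · simp [collapseRuns, hy]

theorem collapseRuns_dropTrail (l : List String) :
    collapseRuns (dropTrailBlanks l) =
      if (collapseRuns l).getLast? = some "" then (collapseRuns l).dropLast else collapseRuns l := by
  have h1 : collapseRuns (dropTrailBlanks l) =
      (collapseRuns (l.reverse.dropWhile (fun s => s == ""))).reverse := by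
    unfold dropTrailBlanks; rw [collapseRuns_reverse]
  rw [h1, collapseRuns_dropLead, collapseRuns_reverse]
  rw [List.head?_reverse, List.tail_reverse]
  by_cases h : (collapseRuns l).getLast? = some "" <;> simp [h]

theorem stripGo_eq (l : List String) (acc : List String) :
    stripGo acc l =
      acc ++ (if acc.getLast? = some "" then collapseRuns (l.dropWhile (fun t => t == ""))
              else collapseRuns l) := by
  induction l generalizing acc with
  | nil => simp [stripGo, collapseRuns, List.dropWhile]
  | cons x rest ih =>
    by_cases hl : acc.getLast? = some ""
    · by_cases hx : x = ""
      · subst hx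
        rw [stripGo, if_pos ⟨rfl, by rw [pyGet_neg_one]; exact hl⟩, ih]
        simp [hl]
      · have hno : ¬ (x = "" ∧ PySem.List.pyGet? acc (-1) = some "") := by tauto
        rw [stripGo, if_neg hno, ih, List.getLast?_concat]
        simp [hl, hx, collapseRuns, List.append_assoc]
    · have hno : ¬ (x = "" ∧ PySem.List.pyGet? acc (-1) = some "") := by
        rw [pyGet_neg_one]; tauto
      rw [stripGo, if_neg hno, ih, List.getLast?_concat]
      by_cases hx : x = ""
      · subst hx
        simp [hl, collapseRuns, List.append_assoc]
      · simp [hl, collapseRuns, hx, List.append_assoc]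

-- ===== VERDICT (by name: the statement is the Claim_ definition above) =====
theorem indent_lines_spec : Claim_equal_indent_lines := by
  intro lines _
  unfold Spec_indent_lines indent_lines indent_lines_alt strip_blank_lines
  rw [PySem.List.foldl_append_singleton_eq_map, List.nil_append]
  rw [stripGo_eq]
  simp only [List.getLast?_nil, reduceCtorEq, if_false, List.nil_append]
  rw [collapseRuns_dropTrail, collapseRuns_dropLead]
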